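-- pv_equiv track=rewrite | github.com/alecproj/DecisionTheoryApp | app/algorithms/example/parser.py | find_pairwise_matrix
-- ===== SOURCE A (Python) =====
-- from typing import Dict, Any, List, Optional
--
-- def _is_number(s: str) -> bool:
--     if not s or not s.strip():
--         return False
--     s = s.strip().replace(',', '.')
--     try:
--         float(s)
--         return True
--     except ValueError:
--         return False
--
-- def find_pairwise_matrix(rows: List[List[str]]) -> tuple[Optional[int], Optional[int], Optional[int]]:
--     pairwise_start = name_col = max_m = None
--     for i, row in enumerate(rows):
--         for j, cell in enumerate(row):
--             if not cell or _is_number(cell):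
--                 continue
--             numbers_right = 0
--             for k in range(j + 1, len(row)):
--                 if _is_number(row[k]):
--                     numbers_right += 1
--                 else:
--                     break
--             if numbers_right >= 3 and i + 1 < len(rows) and len(rows[i + 1]) > j and rows[i + 1][j] and not _is_number(rows[i + 1][j]):
--                 pairwise_start = i
--                 name_col = j
--                 max_m = 0
--                 for offset in range(30):
--                     r_idx = i + offset
--                     if r_idx >= len(rows) or len(rows[r_idx]) <= j or not rows[r_idx][j] or _is_number(rows[r_idx][j]):
--                         break
--                     num_count = 0
--                     for c in range(j + 1, len(rows[r_idx])):
--                         if _is_number(rows[r_idx][c]):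
--                             num_count += 1
--                         else:
--                             break
--                     if num_count > max_m:
--                         max_m = num_count
--                 if max_m >= 2:
--                     return pairwise_start, name_col, max_m
--     return None, None, None
-- ===== SOURCE B (Python) =====
-- from typing import List, Optional
--
-- def _is_number(s: str) -> bool:
--     if not s or not s.strip():
--         return False
--     s = s.strip().replace(',', '.')
--     try:
--         float(s)
--         return True
--     except ValueError:
--         return False
--
-- def find_pairwise_matrix(rows: List[List[str]]) -> tuple[Optional[int], Optional[int], Optional[int]]:
--     # rl[i][j] = count of consecutive numeric cells starting at column j of row i
--     rl = []
--     for row in rows: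
--         r = [0] * (len(row) + 1)
--         for j in range(len(row) - 1, -1, -1):
--             r[j] = r[j + 1] + 1 if _is_number(row[j]) else 0
--         rl.append(r)
--
--     def ok_header(r, j):
--         return (r < len(rows) and j < len(rows[r])
--                 and bool(rows[r][j]) and not _is_number(rows[r][j]))
--
--     def cell_result(i, j):
--         cell = rows[i][j]
--         if not cell or _is_number(cell) or rl[i][j + 1] < 3 or not ok_header(i + 1, j):
--             return None
--         valid = []
--         for o in range(30):
--             if ok_header(i + o, j):
--                 valid.append(o)
--             else:
--                 break
--         m = max((rl[i + o][j + 1] for o in valid), default=0)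
--         return (i, j, m) if m >= 2 else None
--
--     return next((res for i in range(len(rows)) for j in range(len(rows[i]))
--                  if (res := cell_result(i, j)) is not None), (None, None, None))
-- ===== Notes on version B (the rewrite author's own statement) =====
-- stated objective: alternative
-- what changed: B precomputes a per-row run-length table of consecutive numeric cells (one right-to-left pass per row), then scans with a pure per-cell function: the candidate test and the per-row counts become O(1) table lookups, the 30-offset break loop becomes an explicit takeWhile over valid header offsets followed by max() over that prefix, and the first-hit return becomes next() over a generator.
import Mathlib
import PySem

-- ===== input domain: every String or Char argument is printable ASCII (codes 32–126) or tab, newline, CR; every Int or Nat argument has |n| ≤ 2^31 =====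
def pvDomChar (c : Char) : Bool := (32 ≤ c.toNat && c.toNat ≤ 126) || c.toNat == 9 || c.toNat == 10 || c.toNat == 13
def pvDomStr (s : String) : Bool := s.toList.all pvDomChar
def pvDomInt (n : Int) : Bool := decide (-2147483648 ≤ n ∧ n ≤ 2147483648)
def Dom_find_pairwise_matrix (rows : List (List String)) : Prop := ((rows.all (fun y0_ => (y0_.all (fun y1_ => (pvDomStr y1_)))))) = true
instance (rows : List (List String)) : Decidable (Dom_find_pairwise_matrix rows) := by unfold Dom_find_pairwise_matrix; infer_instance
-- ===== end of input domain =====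

-- B replaces A's fused nested loops by a staged design: a per-row run-length table of
-- numeric cells plus a pure per-cell test (takeWhile over header offsets, max over that
-- prefix, first hit found by a generator); objective: alternative (same results).

-- ===== PORT A =====
-- Shared helper: `_is_number`.  `float(s)` is modelled by a hand-written validity check of
-- CPython's float-literal grammar (sign, inf/infinity/nan case-insensitive, digits with
-- single '_' between digits, optional fraction and exponent); exact on the printable-ASCII
-- domain (fuzz-checked against CPython).
def eatDigits : List Char → List Char
  | [] => []
  | c :: rest =>
    if c.isDigit then eatDigits rest
    else if c = '_' then
      match rest with
      | d :: r2 => if d.isDigit then eatDigits r2 else c :: rest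
      | [] => c :: rest
    else c :: rest

def parseDigits? : List Char → Option (List Char)
  | [] => none
  | c :: rest => if c.isDigit then some (eatDigits rest) else none

def floatValid (cs : List Char) : Bool :=
  let cs1 := match cs with
    | c :: rest => if c = '+' || c = '-' then rest else cs
    | [] => cs
  let low := PySem.Chars.lower cs1
  if low = "inf".toList || low = "infinity".toList || low = "nan".toList then true
  else
    let afterMantissa : Option (List Char) :=
      match parseDigits? cs1 with
      | some r =>
        match r with
        | '.' :: r2 =>
          (match parseDigits? r2 with
           | some r3 => some r3
           | none => some r2)
        | _ => some r
      | none =>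
        match cs1 with
        | '.' :: r2 => parseDigits? r2
        | _ => none
    match afterMantissa with
    | none => false
    | some [] => true
    | some (e :: r2) =>
      if e = 'e' || e = 'E' then
        let r3 := match r2 with
          | s :: r4 => if s = '+' || s = '-' then r4 else r2
          | [] => r2
        match parseDigits? r3 with
        | some [] => true
        | _ => false
      else false

def is_number (s : String) : Bool :=
  if s = "" || PySem.Str.strip s = "" then false
  else floatValid (PySem.Chars.replace (PySem.Str.strip s).toList [','] ['.'])

-- A's rightward counting loop (`for k in range(j+1, len(row)) … break`); the fuel
-- argument (structural recursion) only bounds the index walk by the row length.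
def numbersRightGo : Nat → List String → Nat → Nat
  | 0, _, _ => 0
  | fuel + 1, row, k =>
    if h : k < row.length then
      if is_number row[k] then numbersRightGo fuel row (k + 1) + 1 else 0
    else 0

def numbersRight (row : List String) (k : Nat) : Nat :=
  numbersRightGo (row.length - k) row k

-- A's `for offset in range(30)` loop with its break chain and running max.
def offLoopA (rows : List (List String)) (i j : Nat) : List Nat → Nat → Nat
  | [], m => m
  | off :: rest, m =>
    if rows.length ≤ i + off then m
    else if (rows.getD (i + off) []).length ≤ j then m
    else if (rows.getD (i + off) []).getD j "" = "" then m
    else if is_number ((rows.getD (i + off) []).getD j "") then m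
    else
      offLoopA rows i j rest
        (if numbersRight (rows.getD (i + off) []) (j + 1) > m
         then numbersRight (rows.getD (i + off) []) (j + 1) else m)
def colLoopA (rows : List (List String)) (i : Nat) (row : List String) :
    Nat → List String → Option (Nat × Nat × Nat)
  | _, [] => none
  | j, cell :: rest =>
    if cell = "" || is_number cell then colLoopA rows i row (j + 1) rest
    else if numbersRight row (j + 1) ≥ 3 && decide (i + 1 < rows.length)
        && decide (j < (rows.getD (i + 1) []).length)
        && !((rows.getD (i + 1) []).getD j "" = "")
        && !(is_number ((rows.getD (i + 1) []).getD j "")) then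
      if offLoopA rows i j (List.range 30) 0 ≥ 2
      then some (i, j, offLoopA rows i j (List.range 30) 0)
      else colLoopA rows i row (j + 1) rest
    else colLoopA rows i row (j + 1) rest
def rowLoopA (rows : List (List String)) : Nat → List (List String) → Option (Nat × Nat × Nat)
  | _, [] => none
  | i, row :: rest =>
    match colLoopA rows i row 0 row with
    | some res => some res
    | none => rowLoopA rows (i + 1) rest

def find_pairwise_matrix (rows : List (List String)) : Option Int × Option Int × Option Int :=
  match rowLoopA rows 0 rows with
  | some (i, j, m) => (some (i : Int), some (j : Int), some (m : Int))
  | none => (none, none, none)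

-- ===== PORT B =====
-- Source B's right-to-left run-length pass over one row: entry j = run of numbers from column j
-- (one trailing 0, as Source B's `[0] * (len(row) + 1)`).
def rlRow : List String → List Nat
  | [] => [0]
  | c :: rest =>
    let r := rlRow rest
    (if is_number c then r.headD 0 + 1 else 0) :: r

-- Source B's `ok_header`.
def okHeader (rows : List (List String)) (r j : Nat) : Bool :=
  decide (r < rows.length) && decide (j < (rows.getD r []).length)
    && !decide ((rows.getD r []).getD j "" = "")
    && !(is_number ((rows.getD r []).getD j ""))

-- Source B's pure `cell_result`: guard chain, then `valid` (a takeWhile: append until the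
-- first failing offset), then `max(..., default=0)` over the mapped prefix.
def cellResult (rows : List (List String)) (rls : List (List Nat)) (i j : Nat) :
    Option (Nat × Nat × Nat) :=
  let cell := (rows.getD i []).getD j ""
  if decide (cell = "") || is_number cell || decide ((rls.getD i []).getD (j + 1) 0 < 3)
      || !okHeader rows (i + 1) j then
    none
  else
    let valid := (List.range 30).takeWhile (fun o => okHeader rows (i + o) j)
    let m := (valid.map (fun o => (rls.getD (i + o) []).getD (j + 1) 0)).foldl Nat.max 0
    if 2 ≤ m then some (i, j, m) else none

-- Source B's final generator with `next(..., (None, None, None))`.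
def find_pairwise_matrix_alt (rows : List (List String)) : Option Int × Option Int × Option Int :=
  let rls := rows.map rlRow
  match (List.range rows.length).findSome? (fun i =>
      (List.range (rows.getD i []).length).findSome? (fun j => cellResult rows rls i j)) with
  | some (i, j, m) => (some (i : Int), some (j : Int), some (m : Int))
  | none => (none, none, none)

-- ===== PRECONDITION & SPEC =====
def Spec_find_pairwise_matrix (rows : List (List String)) (out : Option Int × Option Int × Option Int) : Prop := out = find_pairwise_matrix_alt rows
instance (rows : List (List String)) (out : Option Int × Option Int × Option Int) : Decidable (Spec_find_pairwise_matrix rows out) := by unfold Spec_find_pairwise_matrix; infer_instance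

-- ===== CLAIM (what is proved, stated in full; the proofs are below) =====
def Claim_equal_find_pairwise_matrix : Prop := ∀ (rows : List (List String)), Dom_find_pairwise_matrix rows → Spec_find_pairwise_matrix rows (find_pairwise_matrix rows)

-- ===== LEMMAS AND PROOFS =====

-- run-length spec shared by both ports' counting mechanisms
def pvRun : List String → Nat
  | [] => 0
  | c :: r => if is_number c then pvRun r + 1 else 0

theorem numbersRightGo_spec : ∀ (fuel : Nat) (row : List String) (k : Nat),
    row.length - k ≤ fuel → numbersRightGo fuel row k = pvRun (row.drop k) := by
  intro fuel
  induction fuel with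
  | zero =>
    intro row k hk
    rw [numbersRightGo, List.drop_eq_nil_of_le (by omega), pvRun]
  | succ fuel ih =>
    intro row k hk
    rw [numbersRightGo]
    by_cases h : k < row.length
    · rw [dif_pos h]
      conv_rhs => rw [← List.getElem_cons_drop (as := row) (h := h)]
      rw [pvRun, ih row (k + 1) (by omega)]
    · rw [dif_neg h, List.drop_eq_nil_of_le (by omega), pvRun]

theorem numbersRight_run (row : List String) (k : Nat) :
    numbersRight row k = pvRun (row.drop k) :=
  numbersRightGo_spec _ row k le_rfl

theorem rlRow_ne_nil (row : List String) : rlRow row ≠ [] := by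
  cases row <;> simp [rlRow]

theorem rlRow_getD (row : List String) (k : Nat) :
    (rlRow row).getD k 0 = numbersRight row k := by
  rw [numbersRight_run]
  induction row generalizing k with
  | nil =>
    cases k <;> simp [rlRow, pvRun]
  | cons c rest ih =>
    cases k with
    | zero =>
      simp only [rlRow, List.getD_cons_zero, List.drop_zero, pvRun]
      rcases hrl : rlRow rest with _ | ⟨a, t⟩
      · exact absurd hrl (rlRow_ne_nil rest)
      · have := ih 0
        rw [hrl] at this
        simp only [List.getD_cons_zero, List.drop_zero] at this
        simp [List.headD, this]
    | succ k =>
      simp only [rlRow, List.getD_cons_succ, List.drop_succ_cons]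
      exact ih k

theorem map_rlRow_getD (rows : List (List String)) (r : Nat) (h : r < rows.length) :
    (rows.map rlRow).getD r [] = rlRow (rows.getD r []) := by
  rw [List.getD_eq_getElem _ _ (by simpa using h), List.getD_eq_getElem _ _ h, List.getElem_map]

theorem rls_lookup (rows : List (List String)) (r k : Nat) (h : r < rows.length) :
    ((rows.map rlRow).getD r []).getD k 0 = numbersRight (rows.getD r []) k := by
  rw [map_rlRow_getD rows r h, rlRow_getD]

theorem okHeader_iff (rows : List (List String)) (r j : Nat) :
    okHeader rows r j = true ↔ r < rows.length ∧ j < (rows.getD r []).length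
      ∧ ¬ ((rows.getD r []).getD j "" = "") ∧ ¬ (is_number ((rows.getD r []).getD j "") = true) := by
  unfold okHeader
  constructor
  · intro h
    rw [Bool.and_eq_true, Bool.and_eq_true, Bool.and_eq_true] at h
    obtain ⟨⟨⟨h1, h2⟩, h3⟩, h4⟩ := h
    refine ⟨of_decide_eq_true h1, of_decide_eq_true h2, ?_, ?_⟩
    · intro hc
      rw [decide_eq_true hc] at h3
      exact absurd h3 (by simp)
    · intro hc
      rw [hc] at h4
      exact absurd h4 (by simp)
  · rintro ⟨h1, h2, h3, h4⟩
    rw [Bool.and_eq_true, Bool.and_eq_true, Bool.and_eq_true]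
    refine ⟨⟨⟨decide_eq_true h1, decide_eq_true h2⟩, ?_⟩, ?_⟩
    · rw [decide_eq_false h3]
      rfl
    · rw [Bool.eq_false_iff.mpr h4]
      rfl

-- A's offset loop equals a fold of max over the takeWhile prefix of valid headers,
-- with counts looked up in B's table.
theorem offLoopA_eq_fold (rows : List (List String)) (i j : Nat) :
    ∀ (offs : List Nat) (m : Nat),
    offLoopA rows i j offs m
      = (((offs.takeWhile (fun o => okHeader rows (i + o) j)).map
          (fun o => ((rows.map rlRow).getD (i + o) []).getD (j + 1) 0)).foldl Nat.max m) := by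
  intro offs
  induction offs with
  | nil => intro m; rfl
  | cons off rest ih =>
    intro m
    rw [offLoopA, List.takeWhile_cons]
    by_cases hok : okHeader rows (i + off) j = true
    · obtain ⟨hb1, hb2, hb3, hb4⟩ := (okHeader_iff rows (i + off) j).mp hok
      rw [if_neg (by omega), if_neg (by omega), if_neg hb3, if_neg hb4, if_pos hok,
        List.map_cons, List.foldl_cons, ih, rls_lookup rows (i + off) (j + 1) (by omega)]
      congr 1
      rcases Nat.lt_or_ge m (numbersRight (rows.getD (i + off) []) (j + 1)) with h | h
      · rw [if_pos h]
        exact (Nat.max_eq_right (Nat.le_of_lt h)).symm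
      · rw [if_neg (by omega)]
        exact (Nat.max_eq_left h).symm
    · rw [if_neg hok]
      by_cases h1 : rows.length ≤ i + off
      · rw [if_pos h1]; rfl
      · rw [if_neg h1]
        by_cases h2 : (rows.getD (i + off) []).length ≤ j
        · rw [if_pos h2]; rfl
        · rw [if_neg h2]
          by_cases h3 : (rows.getD (i + off) []).getD j "" = ""
          · rw [if_pos h3]; rfl
          · rw [if_neg h3]
            by_cases h4 : is_number ((rows.getD (i + off) []).getD j "") = true
            · rw [if_pos h4]; rfl
            · exact absurd ((okHeader_iff rows (i + off) j).mpr
                ⟨by omega, by omega, h3, h4⟩) hok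

-- A's column loop equals B's findSome? over the remaining column indices.
theorem colLoopA_eq_find (rows : List (List String)) (i : Nat) (hi : i < rows.length) :
    ∀ (cells : List String) (j : Nat), cells = (rows.getD i []).drop j →
    colLoopA rows i (rows.getD i []) j cells
      = (List.range' j ((rows.getD i []).length - j)).findSome?
          (fun j => cellResult rows (rows.map rlRow) i j) := by
  intro cells
  induction cells with
  | nil =>
    intro j hj
    have hlen : (rows.getD i []).length ≤ j := by
      by_contra h
      have := congrArg List.length hj
      rw [List.length_drop] at this
      simp only [List.length_nil] at this
      omega
    rw [colLoopA, Nat.sub_eq_zero_of_le hlen]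
    rfl
  | cons cell rest ih =>
    intro j hj
    have hjlt : j < (rows.getD i []).length := by
      by_contra h
      rw [List.drop_eq_nil_of_le (by omega)] at hj
      exact absurd hj (by simp)
    have hdecomp : (rows.getD i []).drop j
        = (rows.getD i [])[j] :: (rows.getD i []).drop (j + 1) :=
      (List.getElem_cons_drop (h := hjlt)).symm
    rw [hdecomp] at hj
    have hcell : cell = (rows.getD i [])[j] := (List.cons.injEq _ _ _ _ ▸ hj).1
    have hrest : rest = (rows.getD i []).drop (j + 1) := (List.cons.injEq _ _ _ _ ▸ hj).2
    have hgetD : (rows.getD i []).getD j "" = cell := by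
      rw [List.getD_eq_getElem _ _ hjlt, hcell]
    have hcount : ((rows.map rlRow).getD i []).getD (j + 1) 0
        = numbersRight (rows.getD i []) (j + 1) := rls_lookup rows i (j + 1) hi
    have hrange : (rows.getD i []).length - j = ((rows.getD i []).length - (j + 1)) + 1 := by
      omega
    rw [colLoopA, hrange, List.range'_succ, List.findSome?_cons]
    have hcr : cellResult rows (rows.map rlRow) i j
        = (if decide (cell = "") || is_number cell
              || decide (numbersRight (rows.getD i []) (j + 1) < 3)
              || !okHeader rows (i + 1) j then
            none
          else
            if 2 ≤ (((List.range 30).takeWhile (fun o => okHeader rows (i + o) j)).map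
                (fun o => ((rows.map rlRow).getD (i + o) []).getD (j + 1) 0)).foldl Nat.max 0
            then some (i, j, (((List.range 30).takeWhile (fun o => okHeader rows (i + o) j)).map
                (fun o => ((rows.map rlRow).getD (i + o) []).getD (j + 1) 0)).foldl Nat.max 0)
            else none) := by
      rw [cellResult]
      simp only [hgetD, hcount]
    rw [hcr]
    by_cases hskip : (cell = "" || is_number cell) = true
    · rw [if_pos hskip]
      have hguard : (decide (cell = "") || is_number cell
          || decide (numbersRight (rows.getD i []) (j + 1) < 3)
          || !okHeader rows (i + 1) j) = true := by
        rcases Bool.or_eq_true_iff.mp hskip with h | h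
        · simp [of_decide_eq_true (by simpa using h)]
        · simp [h]
      rw [if_pos hguard]
      exact ih (j + 1) hrest
    · rw [if_neg hskip]
      have hne : ¬ (cell = "") := fun h => hskip (by simp [h])
      have hnn : is_number cell = false := by
        rcases Bool.eq_false_or_eq_true (is_number cell) with h | h
        · exact absurd (by simp [h] : (cell = "" || is_number cell) = true) hskip
        · exact h
      have hA : (numbersRight (rows.getD i []) (j + 1) ≥ 3 && decide (i + 1 < rows.length)
          && decide (j < (rows.getD (i + 1) []).length)
          && !((rows.getD (i + 1) []).getD j "" = "")
          && !(is_number ((rows.getD (i + 1) []).getD j "")))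
          = (decide (numbersRight (rows.getD i []) (j + 1) ≥ 3) && okHeader rows (i + 1) j) := by
        simp only [okHeader, Bool.and_assoc]
      rw [hA]
      have hguardB : (decide (cell = "") || is_number cell
          || decide (numbersRight (rows.getD i []) (j + 1) < 3)
          || !okHeader rows (i + 1) j)
          = (decide (numbersRight (rows.getD i []) (j + 1) < 3) || !okHeader rows (i + 1) j) := by
        rw [decide_eq_false hne, hnn]
        simp
      rw [hguardB]
      by_cases hnr : 3 ≤ numbersRight (rows.getD i []) (j + 1)
      · by_cases hok2 : okHeader rows (i + 1) j = true
        · have hGB : (decide (numbersRight (rows.getD i []) (j + 1) < 3)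
              || !okHeader rows (i + 1) j) = false := by
            rw [decide_eq_false (by omega : ¬ numbersRight (rows.getD i []) (j + 1) < 3), hok2]
            rfl
          rw [hGB, if_neg (show ¬ (false = true) by simp),
            if_pos (by rw [decide_eq_true (show numbersRight (rows.getD i []) (j + 1) ≥ 3 from hnr), hok2]; rfl),
            offLoopA_eq_fold]
          by_cases hm : 2 ≤ (((List.range 30).takeWhile (fun o => okHeader rows (i + o) j)).map
              (fun o => ((rows.map rlRow).getD (i + o) []).getD (j + 1) 0)).foldl Nat.max 0
          · rw [if_pos hm, if_pos hm]
          · rw [if_neg hm, if_neg hm]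
            exact ih (j + 1) hrest
        · have hok2f : okHeader rows (i + 1) j = false := by
            rcases Bool.eq_false_or_eq_true (okHeader rows (i + 1) j) with h | h
            · exact absurd h hok2
            · exact h
          rw [if_neg (by rw [hok2f]; simp), if_pos (by rw [hok2f]; simp)]
          exact ih (j + 1) hrest
      · rw [if_neg (by rw [decide_eq_false (by omega : ¬ numbersRight (rows.getD i []) (j + 1) ≥ 3)]; simp),
          if_pos (by rw [decide_eq_true (by omega : numbersRight (rows.getD i []) (j + 1) < 3)]; rfl)]
        exact ih (j + 1) hrest

-- A's row loop equals B's findSome? over the remaining row indices.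
theorem rowLoopA_eq_find (rows : List (List String)) :
    ∀ (rest : List (List String)) (i : Nat), rest = rows.drop i →
    rowLoopA rows i rest
      = (List.range' i (rows.length - i)).findSome? (fun i =>
          (List.range (rows.getD i []).length).findSome?
            (fun j => cellResult rows (rows.map rlRow) i j)) := by
  intro rest
  induction rest with
  | nil =>
    intro i hi
    have hlen : rows.length ≤ i := by
      by_contra h
      have := congrArg List.length hi
      simp [List.length_drop] at this
      omega
    rw [rowLoopA, Nat.sub_eq_zero_of_le hlen]
    rfl
  | cons row rest ih =>
    intro i hi
    have hilt : i < rows.length := by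
      by_contra h
      rw [List.drop_eq_nil_of_le (by omega)] at hi
      exact absurd hi (by simp)
    have hdecomp : rows.drop i = rows[i] :: rows.drop (i + 1) :=
      (List.getElem_cons_drop (h := hilt)).symm
    rw [hdecomp] at hi
    have hrow : row = rows[i] := (List.cons.injEq _ _ _ _ ▸ hi).1
    have hrest : rest = rows.drop (i + 1) := (List.cons.injEq _ _ _ _ ▸ hi).2
    have hgetD : rows.getD i [] = row := by
      rw [List.getD_eq_getElem _ _ hilt, hrow]
    have hrange : rows.length - i = (rows.length - (i + 1)) + 1 := by omega
    rw [rowLoopA, hrange, List.range'_succ, List.findSome?_cons]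
    have hcol : colLoopA rows i row 0 row
        = (List.range (rows.getD i []).length).findSome?
            (fun j => cellResult rows (rows.map rlRow) i j) := by
      rw [List.range_eq_range', show (rows.getD i []).length = (rows.getD i []).length - 0 from rfl]
      rw [← colLoopA_eq_find rows i hilt row 0 (by rw [hgetD, List.drop_zero]), hgetD]
    rw [hcol]
    cases (List.range (rows.getD i []).length).findSome?
        (fun j => cellResult rows (rows.map rlRow) i j)
    · exact ih (i + 1) hrest
    · rfl

-- ===== VERDICT (by name: the statement is the Claim_ definition above) =====
theorem find_pairwise_matrix_spec : Claim_equal_find_pairwise_matrix := by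
  intro rows _
  unfold Spec_find_pairwise_matrix find_pairwise_matrix find_pairwise_matrix_alt
  rw [rowLoopA_eq_find rows rows 0 (by simp), List.range_eq_range']
  simp
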